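-- pv_equiv track=rewrite | github.com/keanusales/Automatos | autômato_with_dictonary.py | automato
-- ===== SOURCE A (Python) =====
-- from string import ascii_letters, digits
--
-- LETTERS = "_" + ascii_letters
--
-- LDIGITS = LETTERS + digits
--
-- TYPES = ["int", "char", "bool", "float", "double"]
--
-- def automato(entrie: tuple[str, str]):
--   def automato(entrie: str):
--     def automato(state: int, word: str):
--       if state == 1 and word in LETTERS: return 2
--       if state == 2 and word == ",": return 1
--       if state == 2 and word in LDIGITS: return 2
--       if state == 2 and word == ";": return 3
--       return 0
--     state = 1 # O estado inicial é 1
--     for word in entrie: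
--       state = automato(state, word)
--     return True if state == 3 else False
--   return entrie[0] in TYPES and automato(entrie[1])
-- ===== SOURCE B (Python) =====
-- from string import ascii_letters, digits
--
-- LETTERS = "_" + ascii_letters
-- LDIGITS = LETTERS + digits
-- TYPES = ["int", "char", "bool", "float", "double"]
--
-- def automato(entrie):
--   def valid(decls):
--     if not decls.endswith(";"):
--       return False
--     pieces = decls[:-1].split(",")
--     return all(p and p[0] in LETTERS and all(c in LDIGITS for c in p[1:])
--                for p in pieces)
--   return entrie[0] in TYPES and valid(entrie[1])
-- ===== Notes on version B (the rewrite author's own statement) =====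
-- stated objective: idiomatic
-- what changed: Replaces the explicit character-by-character state machine with a declarative check: the body must end in ';' and every comma-separated piece of the rest must be a non-empty identifier (letter/underscore head, alphanumeric/underscore tail).
import Mathlib
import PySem

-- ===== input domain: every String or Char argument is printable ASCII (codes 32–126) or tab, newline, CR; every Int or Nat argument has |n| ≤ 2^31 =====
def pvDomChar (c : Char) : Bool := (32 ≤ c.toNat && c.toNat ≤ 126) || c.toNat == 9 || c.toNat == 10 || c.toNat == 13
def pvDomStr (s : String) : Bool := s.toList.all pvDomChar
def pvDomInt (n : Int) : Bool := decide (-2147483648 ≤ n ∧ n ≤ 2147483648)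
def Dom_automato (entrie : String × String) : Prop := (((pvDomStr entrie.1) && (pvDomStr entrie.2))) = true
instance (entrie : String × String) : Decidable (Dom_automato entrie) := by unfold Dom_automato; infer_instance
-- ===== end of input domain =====

-- B replaces A's character-by-character state machine by a declarative check (body ends with ';',
-- every comma-separated piece of the rest is a non-empty identifier); same value, same O(n) cost.

-- ===== PORT A =====
def pvLETTERS : List Char := "_abcdefghijklmnopqrstuvwxyzABCDEFGHIJKLMNOPQRSTUVWXYZ".toList
def pvLDIGITS : List Char := pvLETTERS ++ "0123456789".toList
def pvTYPES : List String := ["int", "char", "bool", "float", "double"]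

-- the innermost 'automato(state, word)' of A ('word in LETTERS' on a 1-char word is char membership)
def automatoStep (state : Int) (word : Char) : Int :=
  if state == 1 && pvLETTERS.contains word then 2
  else if state == 2 && word == ',' then 1
  else if state == 2 && pvLDIGITS.contains word then 2
  else if state == 2 && word == ';' then 3
  else 0

def automato (entrie : String × String) : Bool :=
  pvTYPES.contains entrie.1 && ((entrie.2.toList.foldl automatoStep 1) == 3)

-- ===== PORT B =====
-- one piece p: 'p and p[0] in LETTERS and all(c in LDIGITS for c in p[1:])'
def identOK : List Char → Bool
  | [] => false
  | c :: t => pvLETTERS.contains c && t.all (fun d => pvLDIGITS.contains d)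

-- the inner 'valid(decls)' of B
def automatoValid (decls : String) : Bool :=
  if !(PySem.Chars.endswith decls.toList [';']) then false
  else ((PySem.Chars.splitOn (PySem.List.slice decls.toList none (some (-1))) [',']).all identOK)

def automato_alt (entrie : String × String) : Bool :=
  pvTYPES.contains entrie.1 && automatoValid entrie.2

-- ===== PRECONDITION & SPEC =====
def Spec_automato (entrie : String × String) (out : Bool) : Prop := out = automato_alt entrie
instance (entrie : String × String) (out : Bool) : Decidable (Spec_automato entrie out) := by unfold Spec_automato; infer_instance

-- ===== CLAIM (what is proved, stated in full; the proofs are below) =====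
def Claim_equal_automato : Prop := ∀ (entrie : String × String), Dom_automato entrie → Spec_automato entrie (automato entrie)

-- ===== LEMMAS AND PROOFS =====

-- proof-side structural mirror of decls.split(',') for the single-char separator
def mySplit : List Char → List (List Char)
  | [] => [[]]
  | c :: t => if c = ',' then [] :: mySplit t else (mySplit t).modifyHead (c :: ·)

lemma mySplit_ne_nil (l : List Char) : mySplit l ≠ [] := by
  cases l with
  | nil => simp [mySplit]
  | cons c t =>
    simp only [mySplit]
    split
    · simp
    · cases h : mySplit t with
      | nil => exact absurd h (mySplit_ne_nil t)
      | cons a b => simp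

lemma mySplit_exists_cons (l : List Char) : ∃ h t, mySplit l = h :: t := by
  cases hh : mySplit l with
  | nil => exact absurd hh (mySplit_ne_nil l)
  | cons a b => exact ⟨a, b, rfl⟩

lemma go_eq (l : List Char) : ∀ (fuel : Nat) (cur : List Char) (acc : List (List Char)),
    l.length ≤ fuel →
    PySem.Chars.splitOn.go [','] fuel l cur acc =
      acc.reverse ++ (cur.reverse ++ (mySplit l).headI) :: (mySplit l).tail := by
  induction l with
  | nil =>
    intro fuel cur acc _
    cases fuel <;> simp [PySem.Chars.splitOn.go, mySplit]
  | cons c rest ih =>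
    intro fuel cur acc hle
    cases fuel with
    | zero => simp at hle
    | succ f =>
      have hf : rest.length ≤ f := by simpa using hle
      by_cases hc : c = ','
      · subst hc
        have h1 : PySem.Chars.splitOn.go [','] (f+1) (',' :: rest) cur acc =
            PySem.Chars.splitOn.go [','] f rest [] (cur.reverse :: acc) := by
          simp [PySem.Chars.splitOn.go, List.isPrefixOf]
        obtain ⟨h, t, hht⟩ := mySplit_exists_cons rest
        rw [h1, ih f [] (cur.reverse :: acc) hf]
        simp [mySplit, hht]
      · have h1 : PySem.Chars.splitOn.go [','] (f+1) (c :: rest) cur acc =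
            PySem.Chars.splitOn.go [','] f rest (c :: cur) acc := by
          simp [PySem.Chars.splitOn.go, List.isPrefixOf, Ne.symm hc]
        obtain ⟨h, t, hht⟩ := mySplit_exists_cons rest
        rw [h1, ih f (c :: cur) acc hf]
        simp [mySplit, hc, hht]

lemma splitOn_eq_mySplit (l : List Char) :
    PySem.Chars.splitOn l [','] = mySplit l := by
  obtain ⟨h, t, hht⟩ := mySplit_exists_cons l
  have := go_eq l (l.length + 1) [] [] (by omega)
  simpa [PySem.Chars.splitOn, hht] using this

-- A's automaton from state 1 (flag true) / state 2 (flag false), recursively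
def goodFrom : Bool → List Char → Bool
  | _, [] => false
  | true, c :: t => if pvLETTERS.contains c then goodFrom false t else false
  | false, c :: t =>
      if c == ',' then goodFrom true t
      else if pvLDIGITS.contains c then goodFrom false t
      else if c == ';' then t.isEmpty
      else false

lemma foldl_from0 (l : List Char) : l.foldl automatoStep 0 = 0 := by
  induction l with
  | nil => rfl
  | cons c t ih => simpa [automatoStep] using ih

lemma foldl_from3 (l : List Char) : (l.foldl automatoStep 3 == 3) = l.isEmpty := by
  cases l with
  | nil => rfl
  | cons c t => simp [automatoStep, foldl_from0]

lemma foldl_char (l : List Char) :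
    ((l.foldl automatoStep 1 == 3) = goodFrom true l) ∧
    ((l.foldl automatoStep 2 == 3) = goodFrom false l) := by
  induction l with
  | nil => constructor <;> rfl
  | cons c t ih =>
    constructor
    · by_cases h : c ∈ pvLETTERS
      · simpa [automatoStep, goodFrom, h] using ih.2
      · simp [automatoStep, goodFrom, h, foldl_from0]
    · by_cases h1 : c = ','
      · simpa [automatoStep, goodFrom, h1] using ih.1
      · by_cases h2 : c ∈ pvLDIGITS
        · simpa [automatoStep, goodFrom, h1, h2] using ih.2
        · by_cases h3 : c = ';'
          · subst h3
            simp [automatoStep, goodFrom, h1, h2, foldl_from3]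
          · simp [automatoStep, goodFrom, h1, h2, h3, foldl_from0]

-- if the string does not end in ';', the automaton rejects
lemma goodFrom_last_ne : ∀ (l : List Char) (b : Bool), l.getLast? ≠ some ';' → goodFrom b l = false := by
  intro l
  induction l with
  | nil => intro b _; cases b <;> rfl
  | cons c t ih =>
    intro b hl
    have hrec : ∀ b', goodFrom b' t = false := by
      intro b'
      cases t with
      | nil => cases b' <;> rfl
      | cons x xs => exact ih b' (by rwa [List.getLast?_cons_cons] at hl)
    have hcs : ¬(c = ';' ∧ t = []) := by
      rintro ⟨rfl, rfl⟩; exact hl rfl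
    cases b with
    | true => by_cases h : c ∈ pvLETTERS <;> simp [goodFrom, h, hrec]
    | false =>
      by_cases h1 : c = ','
      · simp [goodFrom, h1, hrec]
      · by_cases h2 : c ∈ pvLDIGITS
        · simp [goodFrom, h1, h2, hrec]
        · by_cases h3 : c = ';'
          · subst h3
            have ht : t ≠ [] := by intro hh; exact hcs ⟨rfl, hh⟩
            simp [goodFrom, h1, h2, List.isEmpty_iff, ht]
          · simp [goodFrom, h1, h2, h3]

-- the two sides agree on a body that ends in ';'
lemma good_concat (w : List Char) :
    (goodFrom false (w ++ [';']) =
      ((mySplit w).headI.all (fun d => pvLDIGITS.contains d) && (mySplit w).tail.all identOK)) ∧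
    (goodFrom true (w ++ [';']) = (mySplit w).all identOK) := by
  induction w with
  | nil => constructor <;> rfl
  | cons c w' ih =>
    obtain ⟨h, t, hht⟩ := mySplit_exists_cons w'
    have hLDsemi : (';' : Char) ∉ pvLDIGITS := by decide
    constructor
    · by_cases h1 : c = ','
      · subst h1
        have e1 : goodFrom false ((',' :: w') ++ [';']) = goodFrom true (w' ++ [';']) := by
          simp [goodFrom]
        rw [e1, ih.2]
        simp [mySplit]
      · by_cases h2 : c ∈ pvLDIGITS
        · have hcsemi : c ≠ ';' := by rintro rfl; exact hLDsemi h2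
          have e1 : goodFrom false ((c :: w') ++ [';']) = goodFrom false (w' ++ [';']) := by
            simp [goodFrom, h1, h2]
          rw [e1, ih.1]
          simp [mySplit, h1, hht, h2, Bool.and_assoc]
        · by_cases h3 : c = ';'
          · subst h3
            have e1 : goodFrom false ((';' :: w') ++ [';']) = false := by
              simp [goodFrom, h1, hLDsemi]
            rw [e1]
            simp [mySplit, h1, hht, hLDsemi]
          · have e1 : goodFrom false ((c :: w') ++ [';']) = false := by
              simp [goodFrom, h1, h2, h3]
            rw [e1]
            simp [mySplit, h1, hht, h2]
    · by_cases h : c ∈ pvLETTERS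
      · have hc : c ≠ ',' := by rintro rfl; revert h; decide
        have e1 : goodFrom true ((c :: w') ++ [';']) = goodFrom false (w' ++ [';']) := by
          simp [goodFrom, h]
        rw [e1, ih.1]
        simp [mySplit, hc, hht, identOK, h, Bool.and_assoc]
      · have e1 : goodFrom true ((c :: w') ++ [';']) = false := by
          simp [goodFrom, h]
        rw [e1]
        by_cases hc : c = ','
        · simp [mySplit, hc, identOK]
        · simp [mySplit, hc, hht, identOK, h]

lemma valid_eq (s : String) :
    ((s.toList.foldl automatoStep 1) == 3) = automatoValid s := by
  rcases List.eq_nil_or_concat s.toList with hnil | ⟨w, c, hwc⟩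
  · rw [hnil]
    simp [automatoValid, hnil, PySem.Chars.endswith, List.isSuffixOf, List.isPrefixOf]
  · rw [List.concat_eq_append] at hwc
    rw [hwc, (foldl_char (w ++ [c])).1]
    by_cases hc : c = ';'
    · subst hc
      rw [(good_concat w).2]
      have hend : PySem.Chars.endswith (w ++ [';']) [';'] = true := by
        simp [PySem.Chars.endswith, List.isSuffixOf, List.isPrefixOf, List.reverse_append]
      simp only [automatoValid, hwc, hend, Bool.not_true, Bool.false_eq_true, if_false]
      rw [PySem.List.slice_to_neg_one, List.dropLast_concat, splitOn_eq_mySplit]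
    · have hend : PySem.Chars.endswith (w ++ [c]) [';'] = false := by
        simp [PySem.Chars.endswith, List.isSuffixOf, List.isPrefixOf, List.reverse_append, Ne.symm hc]
      have hfalse : goodFrom true (w ++ [c]) = false := by
        apply goodFrom_last_ne
        simp [hc]
      rw [hfalse]
      simp [automatoValid, hwc, hend]

-- ===== VERDICT (by name: the statement is the Claim_ definition above) =====
theorem automato_spec : Claim_equal_automato := by
  intro entrie _
  unfold Spec_automato automato automato_alt
  rw [valid_eq]
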